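-- pv_equiv track=rewrite | github.com/ydb-platform/ydb | contrib/python/pyperf/pyperf/_metadata.py | _common_metadata
-- ===== SOURCE A (Python) =====
-- def _common_metadata(metadatas):
--     if not metadatas:
--         return {}
--
--     metadata = dict(metadatas[0])
--     for run_metadata in metadatas[1:]:
--         for key in set(metadata) - set(run_metadata):
--             del metadata[key]
--         for key in set(run_metadata) & set(metadata):
--             if run_metadata[key] != metadata[key]:
--                 del metadata[key]
--     return metadata
-- ===== SOURCE B (Python) =====
-- def _common_metadata(metadatas):
--     if not metadatas:
--         return {}
--     rest = metadatas[1:]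
--     return {key: value
--             for key, value in metadatas[0].items()
--             if all(key in run and run[key] == value for run in rest)}
-- ===== Notes on version B (the rewrite author's own statement) =====
-- stated objective: simpler
-- what changed: Replaces the mutating loop that shrinks a working copy of the first dict via set difference/intersection and del with a single dict comprehension over the first dict's items that keeps a pair iff every remaining dict holds the same value for that key.
import Mathlib
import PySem

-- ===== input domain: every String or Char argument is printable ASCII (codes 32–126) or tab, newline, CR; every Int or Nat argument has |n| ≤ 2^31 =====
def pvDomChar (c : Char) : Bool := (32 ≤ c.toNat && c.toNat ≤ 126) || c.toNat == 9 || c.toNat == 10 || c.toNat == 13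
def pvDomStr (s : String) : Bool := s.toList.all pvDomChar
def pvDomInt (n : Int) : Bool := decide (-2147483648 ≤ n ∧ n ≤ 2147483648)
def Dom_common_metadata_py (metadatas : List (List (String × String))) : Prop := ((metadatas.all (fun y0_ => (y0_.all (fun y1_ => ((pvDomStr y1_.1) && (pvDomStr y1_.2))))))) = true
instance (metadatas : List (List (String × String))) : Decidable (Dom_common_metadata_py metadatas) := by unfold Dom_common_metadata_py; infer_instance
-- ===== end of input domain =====

-- B replaces A's mutating shrink-a-working-copy loop (set difference/intersection + del) by one
-- comprehension over the first dict's items keeping a pair iff every later dict agrees on it (objective: simpler).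

-- ===== PORT A =====
-- A's loop body 'for run_metadata in metadatas[1:]: …' kept as a helper
def pvStepA (metadata : PySem.Dict String String) (run_metadata : List (String × String)) :
    PySem.Dict String String :=
  let run : PySem.Dict String String := PySem.Dict.ofList run_metadata
  -- for key in set(metadata) - set(run_metadata): del metadata[key]
  let md1 := (PySem.Set.diff (PySem.Set.ofList metadata.keys) run.keys).foldl
      (fun d k => d.erase k) metadata
  -- for key in set(run_metadata) & set(metadata): if run_metadata[key] != metadata[key]: del metadata[key]
  (PySem.Set.inter (PySem.Set.ofList run.keys) md1.keys).foldl
      (fun d k => if run.get? k ≠ d.get? k then d.erase k else d) md1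

def common_metadata_py (metadatas : List (List (String × String))) : List (String × String) :=
  match metadatas with
  | [] => []                               -- if not metadatas: return {}
  | first :: rest =>
    -- metadata = dict(metadatas[0]); for run_metadata in metadatas[1:]: …; return metadata
    (rest.foldl pvStepA (PySem.Dict.ofList first)).items

-- ===== PORT B =====
def common_metadata_py_alt (metadatas : List (List (String × String))) : List (String × String) :=
  match metadatas with
  | [] => []                               -- if not metadatas: return {}
  | first :: rest =>
    -- {k: v for k, v in metadatas[0].items() if all(k in run and run[k] == v for run in rest)}
    (PySem.Dict.ofList first).items.filter (fun kv =>
      rest.all (fun run_metadata =>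
        (PySem.Dict.ofList run_metadata).contains kv.1 &&
          ((PySem.Dict.ofList run_metadata).get? kv.1 == some kv.2)))

-- ===== PRECONDITION & SPEC =====
def Spec_common_metadata_py (metadatas : List (List (String × String))) (out : List (String × String)) : Prop := out = common_metadata_py_alt metadatas
instance (metadatas : List (List (String × String))) (out : List (String × String)) : Decidable (Spec_common_metadata_py metadatas out) := by unfold Spec_common_metadata_py; infer_instance

-- ===== CLAIM (what is proved, stated in full; the proofs are below) =====
def Claim_equal_common_metadata_py : Prop := ∀ (metadatas : List (List (String × String))), Dom_common_metadata_py metadatas → Spec_common_metadata_py metadatas (common_metadata_py metadatas)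

-- ===== LEMMAS AND PROOFS =====

-- a filter of the items keeps the keys without duplicates
theorem pv_nodup_keys_filter (d : PySem.Dict String String) (p : String × String → Bool)
    (h : d.keys.Nodup) : (PySem.Dict.mk (d.items.filter p)).keys.Nodup :=
  h.sublist (List.Sublist.map _ List.filter_sublist)

-- 'for key in ks: del d[key]' removes exactly the pairs whose key is in ks
theorem pv_foldl_erase_items (ks : List String) (d : PySem.Dict String String) :
    (ks.foldl (fun d k => d.erase k) d).items
      = d.items.filter (fun kv => !(decide (kv.1 ∈ ks))) := by
  induction ks generalizing d with
  | nil => simp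
  | cons k ks ih =>
    rw [List.foldl_cons, ih]
    simp only [PySem.Dict.erase, List.filter_filter]
    apply List.filter_congr
    intro kv _
    by_cases hk : kv.1 = k <;> simp [hk, Bool.and_comm]

-- the same statement at the level of whole dicts, for rewriting
theorem pv_foldl_erase (ks : List String) (d : PySem.Dict String String) :
    ks.foldl (fun d k => d.erase k) d
      = PySem.Dict.mk (d.items.filter (fun kv => !(decide (kv.1 ∈ ks)))) :=
  PySem.Dict.ext (pv_foldl_erase_items ks d)

-- 'for key in ks: if r[key] != d[key]: del d[key]' on distinct keys of a duplicate-free dict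
theorem pv_foldl_iferase_items (r : PySem.Dict String String) (ks : List String)
    (d : PySem.Dict String String) (hd : d.keys.Nodup) (hks : ks.Nodup) :
    (ks.foldl (fun d k => if r.get? k ≠ d.get? k then d.erase k else d) d).items
      = d.items.filter (fun kv => !(decide (kv.1 ∈ ks) && (r.get? kv.1 != some kv.2))) := by
  induction ks generalizing d with
  | nil => simp
  | cons k ks ih =>
    rw [List.foldl_cons]
    by_cases h : r.get? k = d.get? k
    · rw [if_neg (by simpa using h)]
      rw [ih d hd hks.of_cons]
      apply List.filter_congr
      intro kv hkv
      by_cases hk : kv.1 = k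
      · have hv : d.get? kv.1 = some kv.2 :=
          PySem.Dict.get?_of_mem_items d hkv hd
        subst hk
        rw [← h] at hv
        simp [hv]
      · simp [hk]
    · rw [if_pos (by simpa using h)]
      rw [ih (d.erase k) (pv_nodup_keys_filter d _ hd) hks.of_cons]
      simp only [PySem.Dict.erase, List.filter_filter]
      apply List.filter_congr
      intro kv hkv
      by_cases hk : kv.1 = k
      · have hv : d.get? kv.1 = some kv.2 :=
          PySem.Dict.get?_of_mem_items d hkv hd
        subst hk
        have hne : r.get? kv.1 ≠ some kv.2 := by rw [hv] at h; exact h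
        simp [hne]
      · simp [hk]

-- one pass of A's outer loop keeps exactly the pairs the later dict agrees on
theorem pv_stepA_items (d : PySem.Dict String String) (run_metadata : List (String × String))
    (hd : d.keys.Nodup) :
    (pvStepA d run_metadata).items
      = d.items.filter (fun kv => (PySem.Dict.ofList run_metadata).get? kv.1 == some kv.2) := by
  simp only [pvStepA]
  rw [pv_foldl_erase]
  rw [pv_foldl_iferase_items _ _ _
        (pv_nodup_keys_filter d _ hd)
        (PySem.Set.nodup_inter _ _ (PySem.Set.nodup_ofList _))]
  rw [List.filter_filter]
  apply List.filter_congr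
  intro kv hkv
  have hkmem : kv.1 ∈ d.keys := by
    simp only [PySem.Dict.keys, List.mem_map]
    exact ⟨kv, hkv, rfl⟩
  by_cases hm : kv.1 ∈ (PySem.Dict.ofList run_metadata).keys
  · have h1 : kv.1 ∉ PySem.Set.diff (PySem.Set.ofList d.keys) (PySem.Dict.ofList run_metadata).keys := by
      rw [PySem.Set.mem_diff]
      exact fun h => h.2 hm
    have h2 : kv.1 ∈ PySem.Set.inter (PySem.Set.ofList (PySem.Dict.ofList run_metadata).keys)
        (PySem.Dict.mk (d.items.filter (fun kv =>
          !(decide (kv.1 ∈ PySem.Set.diff (PySem.Set.ofList d.keys) (PySem.Dict.ofList run_metadata).keys))))).keys := by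
      rw [PySem.Set.mem_inter]
      refine ⟨(PySem.Set.mem_ofList _ _).2 hm,
        List.mem_map.2 ⟨kv, List.mem_filter.2 ⟨hkv, ?_⟩, rfl⟩⟩
      rw [decide_eq_false h1]
      rfl
    rw [decide_eq_false h1, decide_eq_true h2]
    simp [bne]
  · have hnone : (PySem.Dict.ofList run_metadata).get? kv.1 = none :=
      (PySem.Dict.get?_eq_none_iff_not_mem_keys _ _).2 hm
    have h1 : kv.1 ∈ PySem.Set.diff (PySem.Set.ofList d.keys) (PySem.Dict.ofList run_metadata).keys := by
      rw [PySem.Set.mem_diff]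
      exact ⟨(PySem.Set.mem_ofList _ _).2 hkmem, hm⟩
    rw [decide_eq_true h1, hnone]
    simp

-- the keys of one pass stay duplicate-free
theorem pv_stepA_nodup (d : PySem.Dict String String) (run_metadata : List (String × String))
    (hd : d.keys.Nodup) : (pvStepA d run_metadata).keys.Nodup := by
  have h : (pvStepA d run_metadata).keys
      = (PySem.Dict.mk (d.items.filter (fun kv =>
          (PySem.Dict.ofList run_metadata).get? kv.1 == some kv.2))).keys := by
    simp only [PySem.Dict.keys]
    exact congrArg (List.map _) (pv_stepA_items d run_metadata hd)
  rw [h]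
  exact pv_nodup_keys_filter d _ hd

-- A's whole loop keeps exactly the pairs every later dict agrees on
theorem pv_foldl_stepA_items (rest : List (List (String × String)))
    (d : PySem.Dict String String) (hd : d.keys.Nodup) :
    (rest.foldl pvStepA d).items
      = d.items.filter (fun kv => rest.all (fun run =>
          (PySem.Dict.ofList run).get? kv.1 == some kv.2)) := by
  induction rest generalizing d with
  | nil => simp
  | cons run rest ih =>
    rw [List.foldl_cons, ih _ (pv_stepA_nodup d run hd), pv_stepA_items d run hd,
        List.filter_filter]
    apply List.filter_congr
    intro kv _
    simp [Bool.and_comm]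

-- 'k in run and run[k] == v' is 'run.get?(k) == some v'
theorem pv_contains_and_get (r : PySem.Dict String String) (k v : String) :
    (r.contains k && (r.get? k == some v)) = (r.get? k == some v) := by
  rw [PySem.Dict.contains_eq_isSome_get?]
  cases r.get? k <;> simp

-- ===== VERDICT (by name: the statement is the Claim_ definition above) =====
theorem common_metadata_py_spec : Claim_equal_common_metadata_py := by
  intro metadatas _
  unfold Spec_common_metadata_py
  match metadatas with
  | [] => rfl
  | first :: rest =>
    simp only [common_metadata_py, common_metadata_py_alt]
    rw [pv_foldl_stepA_items rest _ (PySem.Dict.nodup_keys_ofList first)]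
    apply List.filter_congr
    intro kv _
    simp only [pv_contains_and_get]
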